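-- pv_equiv track=rewrite | github.com/sunxibing114514/nscripter-translate-tools | nscript_tool.py | is_command_line
-- ===== SOURCE A (Python) =====
-- COMMANDS = {
--     # 原始核心指令
--     "bg", "ld", "lsp", "lsph", "csp", "vsp", "msp", "print", "tal", "cl",
--     "br", "wait", "delay", "goto", "gosub", "return", "if", "else", "endif",
--     "for", "next", "break", "continue", "stop", "play", "playonce", "wave",
--     "waveloop", "wavestop", "mp3", "mp3loop", "avi", "bgm", "setwindow",
--     "textoff", "texton", "erasetextwindow", "rmode", "systemcall", "trap",
--     "select", "selgosub", "selnum", "btnwait", "btn", "btndef", "click",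
--     "reset", "definereset", "mov", "add", "sub", "inc", "dec", "mul", "div",
--     "mod", "rnd", "rnd2", "cmp", "notif", "end", "quit", "save", "load",
--     "lookback", "caption", "effect", "transmode", "stralias",
--     "numalias", "defaultfont", "selectcolor", "menuselectcolor", "globalon",
--     "humanz", "underline", "rlookback", "roff", "rmenu", "menusetwindow",
--     "killmenu", "defaultspeed", "windoweffect", "mousecursor", "locate",
--     "puttext", "mesbox", "autoclick", "quakex", "quakey", "monocro", "nega",
--     "nsa",
--     "clickstr",
--     "versionstr",
--     "mp3fadeout",
--     "game",
--     "!sd",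
--     "cell",
--     "spbtn",
--     "~",
--     "resettimer",
--     "blt",
--     "waittimer",
--     "jumpb",
--     "ofscpy",
--     "clickstr",
--     "textspeed", "prnum", "spfont", "spstr", "deletescreenshot",
-- }
--
-- def is_command_line(line: str) -> bool:
--     trimmed = line.strip()
--     if not trimmed:
--         return False
--     # 先尝试按空格分割取第一个词（一般情况）
--     first_word = trimmed.split()[0].lower()
--     if first_word in COMMANDS:
--         return True
--     # 处理命令后紧跟引号、括号等无空格的情况
--     # 遍历已知命令，检查 trimmed 是否以该命令开头，并且命令后的第一个字符不是字母或数字（或者就是字符串结尾）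
--     lower_line = trimmed.lower()
--     for cmd in COMMANDS:
--         if lower_line.startswith(cmd) and (len(trimmed) == len(cmd) or not trimmed[len(cmd)].isalnum()):
--             return True
--     return False
-- ===== SOURCE B (Python) =====
-- # All known commands in one whitespace-separated table, split once at import time.
-- _COMMAND_TABLE = """
-- bg ld lsp lsph csp vsp msp print tal cl br wait delay goto gosub return if
-- else endif for next break continue stop play playonce wave waveloop wavestop
-- mp3 mp3loop avi bgm setwindow textoff texton erasetextwindow rmode systemcall
-- trap select selgosub selnum btnwait btn btndef click reset definereset mov add
-- sub inc dec mul div mod rnd rnd2 cmp notif end quit save load lookback caption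
-- effect transmode stralias numalias defaultfont selectcolor menuselectcolor
-- globalon humanz underline rlookback roff rmenu menusetwindow killmenu
-- defaultspeed windoweffect mousecursor locate puttext mesbox autoclick quakex
-- quakey monocro nega nsa clickstr versionstr mp3fadeout game !sd cell spbtn ~
-- resettimer blt waittimer jumpb ofscpy textspeed prnum spfont spstr
-- deletescreenshot
-- """
--
-- COMMANDS = set(_COMMAND_TABLE.split())
--
-- # Commands not starting with an alphanumeric character ('!sd' and '~'):
-- # the only ones the maximal-alnum-run lookup below cannot catch.
-- _SPECIAL = [c for c in COMMANDS if not c[0].isalnum()]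
--
--
-- def is_command_line(line: str) -> bool:
--     trimmed = line.strip()
--     if not trimmed:
--         return False
--     low = trimmed.lower()
--     # maximal leading alphanumeric run of the lowercased line
--     i = 0
--     while i < len(low) and low[i].isalnum():
--         i += 1
--     if low[:i] in COMMANDS:
--         return True
--     # commands starting with a non-alphanumeric character, same boundary rule
--     for cmd in _SPECIAL:
--         if low.startswith(cmd) and (len(low) == len(cmd) or not low[len(cmd)].isalnum()):
--             return True
--     return False
-- ===== Notes on version B (the rewrite author's own statement) =====
-- stated objective: alternative
-- what changed: Instead of a split()-then-membership check followed by a startswith scan over all ~110 commands, B extracts the maximal leading alphanumeric run once and does a single set lookup, scanning only the two non-alphanumeric-initial commands ('!sd', '~') with the original boundary rule; the command set itself is built by splitting one whitespace-separated table string.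
import Mathlib
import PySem

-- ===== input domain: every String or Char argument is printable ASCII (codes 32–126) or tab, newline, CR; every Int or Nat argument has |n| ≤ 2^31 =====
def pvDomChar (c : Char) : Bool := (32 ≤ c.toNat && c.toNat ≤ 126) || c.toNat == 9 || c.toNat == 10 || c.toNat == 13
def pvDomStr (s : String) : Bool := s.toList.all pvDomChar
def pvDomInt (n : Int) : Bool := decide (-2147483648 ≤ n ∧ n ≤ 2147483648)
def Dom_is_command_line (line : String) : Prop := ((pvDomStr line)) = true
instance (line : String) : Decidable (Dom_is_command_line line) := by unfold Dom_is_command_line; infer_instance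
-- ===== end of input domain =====

-- B replaces A's membership test on split()[0] plus a startswith scan over all ~110 commands by one
-- set lookup of the maximal leading alphanumeric run, scanning only the two non-alphanumeric-initial
-- commands; B builds the command set by splitting one whitespace-separated table string.

-- ===== PORT A =====
-- the COMMANDS set literal (the source lists "clickstr" twice; Set.ofList keeps first occurrences)
def pvCommands : PySem.Set String := PySem.Set.ofList [
    "bg", "ld", "lsp", "lsph", "csp", "vsp", "msp", "print", "tal", "cl", "br", "wait",
    "delay", "goto", "gosub", "return", "if", "else", "endif", "for", "next", "break",
    "continue", "stop", "play", "playonce", "wave", "waveloop", "wavestop", "mp3", "mp3loop",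
    "avi", "bgm", "setwindow", "textoff", "texton", "erasetextwindow", "rmode", "systemcall",
    "trap", "select", "selgosub", "selnum", "btnwait", "btn", "btndef", "click", "reset",
    "definereset", "mov", "add", "sub", "inc", "dec", "mul", "div", "mod", "rnd", "rnd2",
    "cmp", "notif", "end", "quit", "save", "load", "lookback", "caption", "effect",
    "transmode", "stralias", "numalias", "defaultfont", "selectcolor", "menuselectcolor",
    "globalon", "humanz", "underline", "rlookback", "roff", "rmenu", "menusetwindow",
    "killmenu", "defaultspeed", "windoweffect", "mousecursor", "locate", "puttext", "mesbox",
    "autoclick", "quakex", "quakey", "monocro", "nega", "nsa", "clickstr", "versionstr",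
    "mp3fadeout", "game", "!sd", "cell", "spbtn", "~", "resettimer", "blt", "waittimer",
    "jumpb", "ofscpy", "clickstr", "textspeed", "prnum", "spfont", "spstr",
    "deletescreenshot"]

-- 'len(trimmed) == len(cmd) or not trimmed[len(cmd)].isalnum()'; trimmed[len(cmd)] can only be
-- out of range when the first disjunct already holds, so the '.elim false' default is unreachable
def pvBoundaryOkA (trimmed cmd : String) : Bool :=
  PySem.Str.len trimmed == PySem.Str.len cmd ||
    !((PySem.Str.pyGet? trimmed (PySem.Str.len cmd : Int)).elim false PySem.Chars.isalnum)

def is_command_line (line : String) : Bool :=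
  let trimmed := PySem.Str.strip line
  if trimmed == "" then false
  else
    let firstWord := PySem.Str.lower ((PySem.Str.split₀ trimmed).headD "")
    if PySem.Set.contains pvCommands firstWord then true
    else
      let lowerLine := PySem.Str.lower trimmed
      pvCommands.any (fun cmd => PySem.Str.startswith lowerLine cmd && pvBoundaryOkA trimmed cmd)

-- ===== PORT B =====
-- Source B's _COMMAND_TABLE: the same commands as one whitespace-separated string
def pvCmdTable : String := "\nbg ld lsp lsph csp vsp msp print tal cl br wait delay goto gosub return if\nelse endif for next break continue stop play playonce wave waveloop wavestop\nmp3 mp3loop avi bgm setwindow textoff texton erasetextwindow rmode systemcall\ntrap select selgosub selnum btnwait btn btndef click reset definereset mov add\nsub inc dec mul div mod rnd rnd2 cmp notif end quit save load lookback caption\neffect transmode stralias numalias defaultfont selectcolor menuselectcolor\nglobalon humanz underline rlookback roff rmenu menusetwindow killmenu\ndefaultspeed windoweffect mousecursor locate puttext mesbox autoclick quakex\nquakey monocro nega nsa clickstr versionstr mp3fadeout game !sd cell spbtn ~\nresettimer blt waittimer jumpb ofscpy textspeed prnum spfont spstr\ndeletescreenshot\n"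

-- 'COMMANDS = set(_COMMAND_TABLE.split())'
def pvCommandsB : PySem.Set String := PySem.Set.ofList (PySem.Str.split₀ pvCmdTable)

-- '[c for c in COMMANDS if not c[0].isalnum()]'
def pvSpecials : List String :=
  pvCommandsB.filter (fun c => !((PySem.Str.pyGet? c (0 : Int)).elim false PySem.Chars.isalnum))

def is_command_line_alt (line : String) : Bool :=
  let trimmed := PySem.Str.strip line
  if trimmed == "" then false
  else
    let low := PySem.Str.lower trimmed
    -- the while loop 'i = 0; while i < len(low) and low[i].isalnum(): i += 1; run = low[:i]'
    -- computes exactly the maximal leading alphanumeric run, i.e. takeWhile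
    let run := String.ofList (low.toList.takeWhile PySem.Chars.isalnum)
    if PySem.Set.contains pvCommandsB run then true
    else
      pvSpecials.any (fun cmd =>
        PySem.Str.startswith low cmd &&
          (PySem.Str.len low == PySem.Str.len cmd ||
            !((PySem.Str.pyGet? low (PySem.Str.len cmd : Int)).elim false PySem.Chars.isalnum)))

-- ===== PRECONDITION & SPEC =====
def Spec_is_command_line (line : String) (out : Bool) : Prop := out = is_command_line_alt line
instance (line : String) (out : Bool) : Decidable (Spec_is_command_line line out) := by unfold Spec_is_command_line; infer_instance

-- ===== CLAIM (what is proved, stated in full; the proofs are below) =====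
def Claim_equal_is_command_line : Prop := ∀ (line : String), Dom_is_command_line line → Spec_is_command_line line (is_command_line line)

-- ===== LEMMAS AND PROOFS =====

-- splitting the table yields exactly A's (deduplicated) command list
set_option maxHeartbeats 4000000 in
set_option maxRecDepth 100000 in
theorem pv_setB_eq : pvCommandsB = pvCommands := by decide

theorem pv_toNat_lowerChar (c : Char) :
    (PySem.Chars.lowerChar c).toNat = if 65 ≤ c.toNat ∧ c.toNat ≤ 90 then c.toNat + 32 else c.toNat := by
  simp only [PySem.Chars.lowerChar, PySem.Chars.isupper]
  by_cases h : 65 ≤ c.toNat ∧ c.toNat ≤ 90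
  · have hA : ('A' ≤ c) := by simp only [Char.le_def]; show 65 ≤ c.toNat; omega
    have hZ : (c ≤ 'Z') := by simp only [Char.le_def]; show c.toNat ≤ 90; omega
    have hv : (c.toNat + 32).isValidChar := by
      unfold Nat.isValidChar; left; omega
    simp [hA, hZ, h, Char.ofNat, hv, Char.ofNatAux]
    omega
  · have : ¬ ('A' ≤ c ∧ c ≤ 'Z') := by
      simp only [Char.le_def]
      show ¬ (65 ≤ c.toNat ∧ c.toNat ≤ 90); omega
    rcases not_and_or.mp this with h' | h' <;> simp [h', h]

theorem pv_isalnum_iff (c : Char) :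
    PySem.Chars.isalnum c = true ↔
      (65 ≤ c.toNat ∧ c.toNat ≤ 90) ∨ (97 ≤ c.toNat ∧ c.toNat ≤ 122) ∨ (48 ≤ c.toNat ∧ c.toNat ≤ 57) := by
  simp only [PySem.Chars.isalnum, PySem.Chars.isalpha, PySem.Chars.isdigit,
    PySem.Chars.isupper, PySem.Chars.islower, Char.le_def,
    Bool.or_eq_true, Bool.and_eq_true, decide_eq_true_eq]
  show ((65 ≤ c.toNat ∧ c.toNat ≤ 90) ∨ (97 ≤ c.toNat ∧ c.toNat ≤ 122)) ∨ (48 ≤ c.toNat ∧ c.toNat ≤ 57) ↔ _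
  tauto

theorem pv_isalnum_lowerChar (c : Char) :
    PySem.Chars.isalnum (PySem.Chars.lowerChar c) = PySem.Chars.isalnum c := by
  cases hc : PySem.Chars.isalnum c
  · rw [← Bool.not_eq_true] at hc ⊢
    rw [pv_isalnum_iff] at hc ⊢
    rw [pv_toNat_lowerChar]
    split_ifs <;> omega
  · rw [pv_isalnum_iff] at hc
    rw [pv_isalnum_iff, pv_toNat_lowerChar]
    split_ifs <;> omega

theorem pv_isspace_not_isalnum (c : Char) (h : PySem.Chars.isspace c = true) :
    PySem.Chars.isalnum c = false := by
  rw [← Bool.not_eq_true, pv_isalnum_iff]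
  simp only [PySem.Chars.isspace, Bool.or_eq_true, Bool.and_eq_true, decide_eq_true_eq] at h
  omega

theorem pv_go_acc (t : List Char) : ∀ (cur : List Char) (acc : List (List Char)),
    PySem.Chars.split₀.go t cur acc = acc.reverse ++ PySem.Chars.split₀.go t cur [] := by
  induction t with
  | nil =>
    intro cur acc
    simp only [PySem.Chars.split₀.go]
    by_cases h : cur.isEmpty <;> simp [h]
  | cons c rest ih =>
    intro cur acc
    simp only [PySem.Chars.split₀.go]
    by_cases hs : PySem.Chars.isspace c
    · by_cases h : cur.isEmpty <;> simp only [hs, h, if_true, if_false, ite_true, ite_false]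
      · exact ih [] acc
      · rw [ih [] (cur.reverse :: acc), ih [] [cur.reverse]]
        simp
    · simp only [hs, ite_false, Bool.false_eq_true]
      exact ih (c :: cur) acc

theorem pv_go_head (t : List Char) : ∀ (cur : List Char), cur ≠ [] →
    ∃ ws, PySem.Chars.split₀.go t cur [] =
      (cur.reverse ++ t.takeWhile (fun c => !PySem.Chars.isspace c)) :: ws := by
  induction t with
  | nil =>
    intro cur hcur
    refine ⟨[], ?_⟩
    simp only [PySem.Chars.split₀.go]
    simp [List.isEmpty_iff, hcur]
  | cons c rest ih =>
    intro cur hcur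
    simp only [PySem.Chars.split₀.go]
    by_cases hs : PySem.Chars.isspace c
    · simp only [hs, if_true, List.isEmpty_iff, hcur, ite_true, ite_false]
      refine ⟨PySem.Chars.split₀.go rest [] [], ?_⟩
      rw [pv_go_acc rest [] [cur.reverse]]
      simp [List.takeWhile, hs]
    · simp only [hs, Bool.false_eq_true, ite_false]
      obtain ⟨ws, hws⟩ := ih (c :: cur) (by simp)
      refine ⟨ws, ?_⟩
      rw [hws]
      simp [List.takeWhile, hs]

theorem pv_split0_head (c : Char) (rest : List Char) (hc : PySem.Chars.isspace c = false) :
    ∃ ws, PySem.Chars.split₀ (c :: rest) =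
      ((c :: rest).takeWhile (fun x => !PySem.Chars.isspace x)) :: ws := by
  unfold PySem.Chars.split₀
  simp only [PySem.Chars.split₀.go, hc, Bool.false_eq_true, ite_false]
  obtain ⟨ws, hws⟩ := pv_go_head rest [c] (by simp)
  refine ⟨ws, ?_⟩
  rw [hws]
  simp [List.takeWhile, hc]

-- strip: head is not a space
theorem pv_strip_head (s : List Char) (c : Char) (rest : List Char)
    (h : PySem.Chars.strip s = c :: rest) : PySem.Chars.isspace c = false := by
  unfold PySem.Chars.strip PySem.Chars.rstrip at h
  have hpre : c :: rest <+: PySem.Chars.lstrip s := by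
    rw [← h]
    have hsuf : (PySem.Chars.lstrip s).reverse.dropWhile PySem.Chars.isspace <:+ (PySem.Chars.lstrip s).reverse :=
      List.dropWhile_suffix _
    have := hsuf.reverse
    simpa using this
  obtain ⟨tl, htl⟩ := hpre
  unfold PySem.Chars.lstrip at htl
  have hh := List.head?_dropWhile_not PySem.Chars.isspace s
  rw [← htl] at hh
  simpa using hh

theorem pv_takeWhile_all_append (p : Char → Bool) (cmd r : List Char) (hall : cmd.all p = true) :
    (cmd ++ r).takeWhile p = cmd ++ r.takeWhile p := by
  rw [List.takeWhile_append]
  rw [List.takeWhile_eq_self_iff.mpr (by simpa [List.all_eq_true] using hall)]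
  simp

theorem pv_run_iff (low cmd : List Char) (hall : cmd.all PySem.Chars.isalnum = true) :
    (PySem.Chars.startswith low cmd &&
      (low.length == cmd.length || !((low[cmd.length]?).elim false PySem.Chars.isalnum))) = true
    ↔ low.takeWhile PySem.Chars.isalnum = cmd := by
  constructor
  · rintro h
    rw [Bool.and_eq_true] at h
    obtain ⟨hpre, hb⟩ := h
    rw [PySem.Chars.startswith_iff] at hpre
    obtain ⟨r, hr⟩ := hpre
    subst hr
    rw [pv_takeWhile_all_append _ _ _ hall]
    cases r with
    | nil => simp
    | cons a r' =>
      have hidx : (cmd ++ a :: r')[cmd.length]? = some a := by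
        simp
      rw [hidx] at hb
      simp only [Option.elim, Bool.or_eq_true, beq_iff_eq, List.length_append, List.length_cons,
        Bool.not_eq_true'] at hb
      rcases hb with hb | hb
      · omega
      · simp [List.takeWhile, hb]
  · intro h
    rw [Bool.and_eq_true]
    constructor
    · rw [PySem.Chars.startswith_iff, ← h]
      exact List.takeWhile_prefix _
    · have hsplit := List.takeWhile_append_dropWhile (p := PySem.Chars.isalnum) (l := low)
      rw [h] at hsplit
      cases hd : low.dropWhile PySem.Chars.isalnum with
      | nil =>
        rw [hd] at hsplit
        simp only [List.append_nil] at hsplit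
        simp [← hsplit]
      | cons a r' =>
        rw [hd] at hsplit
        have hidx : low[cmd.length]? = some a := by
          rw [← hsplit]; simp
        have hna : PySem.Chars.isalnum a = false := by
          have := List.head?_dropWhile_not PySem.Chars.isalnum low
          rw [hd] at this
          simpa using this
        rw [hidx]
        simp [hna]

-- classification of the literal command set: a command's characters are all alphanumeric
-- exactly when its first character is
set_option maxHeartbeats 4000000 in
set_option maxRecDepth 10000 in
theorem pv_classify : ∀ cmd ∈ (pvCommands : List String),
    (cmd.toList.all PySem.Chars.isalnum) =
      ((PySem.Str.pyGet? cmd (0 : Int)).elim false PySem.Chars.isalnum) := by decide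

theorem pv_contains_iff (s : PySem.Set String) (x : String) :
    PySem.Set.contains s x = true ↔ x ∈ (s : List String) := by
  simp [PySem.Set.contains]

theorem pv_ite_or (c b : Bool) : (if c then true else b) = (c || b) := by
  cases c <;> simp

-- the shared loop condition of both ports, on the lowercased line
def pvCondB (low cmd : String) : Bool :=
  PySem.Str.startswith low cmd &&
    (PySem.Str.len low == PySem.Str.len cmd ||
      !((PySem.Str.pyGet? low (PySem.Str.len cmd : Int)).elim false PySem.Chars.isalnum))

theorem pv_condB_eq (low cmd : String) :
    pvCondB low cmd = (PySem.Chars.startswith low.toList cmd.toList &&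
      (low.toList.length == cmd.toList.length ||
        !((low.toList[cmd.toList.length]?).elim false PySem.Chars.isalnum))) := by
  unfold pvCondB
  rw [PySem.Str.startswith_eq, PySem.Str.len_eq, PySem.Str.len_eq, PySem.Str.pyGet?_natCast]
  congr 1
  congr 1
  simp [beq_iff_eq]

theorem pv_lower_getElem_elim (t : List Char) (n : Nat) :
    (((PySem.Chars.lower t)[n]?).elim false PySem.Chars.isalnum)
      = ((t[n]?).elim false PySem.Chars.isalnum) := by
  unfold PySem.Chars.lower
  rw [List.getElem?_map]
  cases t[n]? <;> simp [pv_isalnum_lowerChar]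

theorem pv_condA_eq (t cmd : String) :
    (PySem.Str.startswith (PySem.Str.lower t) cmd && pvBoundaryOkA t cmd)
      = pvCondB (PySem.Str.lower t) cmd := by
  rw [pv_condB_eq]
  unfold pvBoundaryOkA
  rw [PySem.Str.startswith_eq, PySem.Str.len_eq, PySem.Str.len_eq, PySem.Str.pyGet?_natCast,
    PySem.Str.toList_lower]
  congr 1
  have hlen : (PySem.Chars.lower t.toList).length = t.toList.length := by
    unfold PySem.Chars.lower; simp
  rw [hlen, pv_lower_getElem_elim]
  congr 1
  simp [beq_iff_eq]

theorem pv_takeWhile_all (p : Char → Bool) (l : List Char) : (l.takeWhile p).all p = true := by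
  rw [List.all_eq_true]
  intro a ha
  exact List.mem_takeWhile_imp ha

theorem pv_specials_eq : pvSpecials =
    pvCommands.filter (fun c => !((PySem.Str.pyGet? c (0 : Int)).elim false PySem.Chars.isalnum)) := by
  unfold pvSpecials
  rw [pv_setB_eq]

theorem pv_E1 (low : String) :
    (pvCommands.any (fun cmd => pvCondB low cmd))
      = (PySem.Set.contains pvCommands
            (String.ofList (low.toList.takeWhile PySem.Chars.isalnum))
         || pvSpecials.any (fun cmd => pvCondB low cmd)) := by
  rw [Bool.eq_iff_iff]
  simp only [Bool.or_eq_true, List.any_eq_true]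
  constructor
  · rintro ⟨cmd, hmem, hcond⟩
    by_cases hall : cmd.toList.all PySem.Chars.isalnum = true
    · left
      have hrun : low.toList.takeWhile PySem.Chars.isalnum = cmd.toList := by
        rw [← pv_run_iff _ _ hall, ← pv_condB_eq]
        exact hcond
      rw [hrun, String.ofList_toList]
      exact (pv_contains_iff _ _).mpr hmem
    · right
      refine ⟨cmd, ?_, hcond⟩
      rw [pv_specials_eq, List.mem_filter]
      refine ⟨hmem, ?_⟩
      have hcl := pv_classify cmd hmem
      rw [Bool.not_eq_true] at hall
      rw [hall] at hcl
      simp only [Bool.not_eq_true']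
      simpa using hcl.symm
  · rintro (hrun | ⟨cmd, hmem, hcond⟩)
    · refine ⟨String.ofList (low.toList.takeWhile PySem.Chars.isalnum),
        (pv_contains_iff _ _).mp hrun, ?_⟩
      rw [pv_condB_eq, String.toList_ofList]
      rw [pv_run_iff _ _ (pv_takeWhile_all _ _)]
    · refine ⟨cmd, ?_, hcond⟩
      rw [pv_specials_eq] at hmem
      exact (List.mem_filter.mp hmem).1

theorem pv_E2 (t : String) (c0 : Char) (rest0 : List Char)
    (htl : t.toList = c0 :: rest0) (hc0 : PySem.Chars.isspace c0 = false)
    (hfw : PySem.Set.contains pvCommands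
        (PySem.Str.lower ((PySem.Str.split₀ t).headD "")) = true) :
    (PySem.Set.contains pvCommands
        (String.ofList ((PySem.Str.lower t).toList.takeWhile PySem.Chars.isalnum))
      || pvSpecials.any (fun cmd => pvCondB (PySem.Str.lower t) cmd)) = true := by
  -- the first word is the maximal non-space run
  obtain ⟨ws, hws⟩ := pv_split0_head c0 rest0 hc0
  rw [← htl] at hws
  have hsplit : PySem.Str.split₀ t =
      String.ofList (t.toList.takeWhile (fun x => !PySem.Chars.isspace x)) :: ws.map String.ofList := by
    unfold PySem.Str.split₀
    rw [hws]
    simp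
  set token := t.toList.takeWhile (fun x => !PySem.Chars.isspace x) with htok
  set rd := t.toList.dropWhile (fun x => !PySem.Chars.isspace x) with hrd
  have hdecomp : t.toList = token ++ rd := (List.takeWhile_append_dropWhile).symm
  have hfw' : PySem.Set.contains pvCommands
      (String.ofList (PySem.Chars.lower token)) = true := by
    rw [hsplit] at hfw
    simpa [PySem.Str.lower] using hfw
  set fwL := PySem.Chars.lower token with hfwL
  have hlowL : (PySem.Str.lower t).toList = fwL ++ rd.map PySem.Chars.lowerChar := by
    rw [PySem.Str.toList_lower, hdecomp, hfwL]
    simp [PySem.Chars.lower]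
  have hrdhead : ∀ a r, rd = a :: r → PySem.Chars.isspace a = true := by
    intro a r har
    have hh := List.head?_dropWhile_not (fun x => !PySem.Chars.isspace x) t.toList
    rw [← hrd, har] at hh
    simpa using hh
  have hlenfw : fwL.length = token.length := by rw [hfwL]; simp [PySem.Chars.lower]
  have hbound : (((PySem.Str.lower t).toList.length == fwL.length ||
      !(((PySem.Str.lower t).toList[fwL.length]?).elim false PySem.Chars.isalnum))) = true := by
    cases har : rd with
    | nil =>
      rw [hlowL, har]
      simp
    | cons a r =>
      have hidx : ((PySem.Str.lower t).toList)[fwL.length]? = some (PySem.Chars.lowerChar a) := by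
        rw [hlowL, har]
        simp
      rw [hidx]
      have : PySem.Chars.isalnum (PySem.Chars.lowerChar a) = false := by
        rw [pv_isalnum_lowerChar]
        exact pv_isspace_not_isalnum a (hrdhead a r har)
      simp [this]
  have hpre : PySem.Chars.startswith (PySem.Str.lower t).toList fwL = true := by
    rw [PySem.Chars.startswith_iff, hlowL]
    exact ⟨rd.map PySem.Chars.lowerChar, rfl⟩
  by_cases hall : fwL.all PySem.Chars.isalnum = true
  · -- the run equals the first word
    have hrun : (PySem.Str.lower t).toList.takeWhile PySem.Chars.isalnum = fwL := by
      rw [hlowL, pv_takeWhile_all_append _ _ _ hall]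
      cases har : rd with
      | nil => simp
      | cons a r =>
        have : PySem.Chars.isalnum (PySem.Chars.lowerChar a) = false := by
          rw [pv_isalnum_lowerChar]
          exact pv_isspace_not_isalnum a (hrdhead a r har)
        simp [List.takeWhile, this]
    rw [hrun]
    rw [hfw']
    simp
  · -- the first word is one of the special commands
    have hmem : String.ofList fwL ∈ (pvCommands : List String) :=
      (pv_contains_iff _ _).mp hfw'
    have hcl := pv_classify _ hmem
    rw [String.toList_ofList] at hcl
    rw [Bool.not_eq_true] at hall
    rw [hall] at hcl
    have hspec : String.ofList fwL ∈ pvSpecials := by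
      rw [pv_specials_eq, List.mem_filter]
      refine ⟨hmem, ?_⟩
      simp only [Bool.not_eq_true']
      simpa using hcl.symm
    have hcond : pvCondB (PySem.Str.lower t) (String.ofList fwL) = true := by
      rw [pv_condB_eq, String.toList_ofList]
      rw [hpre, hbound]
      rfl
    refine Bool.or_eq_true_iff.mpr (Or.inr ?_)
    rw [List.any_eq_true]
    exact ⟨String.ofList fwL, hspec, hcond⟩

theorem pv_main (line : String) : is_command_line line = is_command_line_alt line := by
  unfold is_command_line is_command_line_alt
  rw [pv_setB_eq]
  by_cases h0 : PySem.Str.strip line = ""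
  · simp [h0]
  · have hbe : (PySem.Str.strip line == "") = false := by
      simp [h0]
    simp only [hbe, Bool.false_eq_true, if_false]
    rw [pv_ite_or, pv_ite_or]
    set t := PySem.Str.strip line with ht
    obtain ⟨c0, rest0, htl⟩ : ∃ c rest, t.toList = c :: rest := by
      cases h : t.toList with
      | nil =>
        exfalso
        apply h0
        apply String.ext
        simpa using h
      | cons c r => exact ⟨c, r, rfl⟩
    have hc0 : PySem.Chars.isspace c0 = false := by
      apply pv_strip_head line.toList c0 rest0
      rw [← PySem.Str.toList_strip, ← ht, htl]
    have hcb : (fun cmd => PySem.Str.startswith (PySem.Str.lower t) cmd && pvBoundaryOkA t cmd)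
        = (fun cmd => pvCondB (PySem.Str.lower t) cmd) := by
      funext cmd
      exact pv_condA_eq t cmd
    have halt : (fun cmd => PySem.Str.startswith (PySem.Str.lower t) cmd &&
        (PySem.Str.len (PySem.Str.lower t) == PySem.Str.len cmd ||
          !((PySem.Str.pyGet? (PySem.Str.lower t) (PySem.Str.len cmd : Int)).elim false
              PySem.Chars.isalnum)))
        = (fun cmd => pvCondB (PySem.Str.lower t) cmd) := rfl
    rw [hcb, halt, pv_E1]
    cases hfw : PySem.Set.contains pvCommands
        (PySem.Str.lower ((PySem.Str.split₀ t).headD "")) with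
    | false => simp
    | true =>
      rw [pv_E2 t c0 rest0 htl hc0 hfw]
      simp

-- ===== VERDICT (by name: the statement is the Claim_ definition above) =====
theorem is_command_line_spec : Claim_equal_is_command_line := by
  intro line _
  unfold Spec_is_command_line
  exact pv_main line
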